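-- pv_equiv track=rewrite | github.com/SeongilHeo/Algorithm | B-No.8958.py | count
-- ===== SOURCE A (Python) =====
-- def count(l):
--     temp=0
--     total=0
--     for i in l:
--         if i=="O":
--             temp+=1
--         else:
--             temp=0
--         total+=temp
--     return total
-- ===== SOURCE B (Python) =====
-- from itertools import groupby
--
-- def count(l):
--     # Run-length decomposition: each maximal run of k "O"s contributes k*(k+1)//2.
--     total = 0
--     for key, group in groupby(l):
--         if key == "O":
--             k = sum(1 for _ in group)
--             total += k * (k + 1) // 2
--     return total
-- ===== Notes on version B (the rewrite author's own statement) =====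
-- stated objective: alternative
-- what changed: Replaced the running-streak accumulator with itertools.groupby run-length decomposition: each maximal run of k 'O's contributes the closed-form triangular number k*(k+1)//2.
import Mathlib
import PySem

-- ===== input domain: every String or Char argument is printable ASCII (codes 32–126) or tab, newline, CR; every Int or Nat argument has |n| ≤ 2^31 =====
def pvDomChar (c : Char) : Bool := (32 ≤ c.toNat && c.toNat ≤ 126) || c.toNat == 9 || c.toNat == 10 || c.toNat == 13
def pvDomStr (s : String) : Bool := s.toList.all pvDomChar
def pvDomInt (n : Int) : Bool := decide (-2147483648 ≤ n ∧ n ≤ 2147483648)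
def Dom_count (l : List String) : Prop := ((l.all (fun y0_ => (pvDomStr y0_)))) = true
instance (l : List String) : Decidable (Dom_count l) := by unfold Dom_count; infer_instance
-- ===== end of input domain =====

-- B replaces A's running-streak accumulator by a groupby run-length decomposition with the triangular closed form; alternative, same cost.

-- ===== PORT A =====
-- the loop 'for i in l' carrying (temp, total)
def count (l : List String) : Int :=
  (l.foldl (fun (st : Int × Int) i =>
    let temp := if i == "O" then st.1 + 1 else 0
    (temp, st.2 + temp)) (0, 0)).2

-- ===== PORT B =====
-- one groupby step: consume the maximal run of elements equal to the head,
-- add k*(k+1)//2 if the key is "O", continue with the remaining groups.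
def countRuns : List String → Int
  | [] => 0
  | x :: xs =>
    let run := xs.takeWhile (· == x)
    let rest := xs.dropWhile (· == x)
    (if x == "O" then
        let k : Int := (run.length : Int) + 1
        PySem.Int.floordiv (k * (k + 1)) 2
      else 0) + countRuns rest
  termination_by l => l.length
  decreasing_by
    simp only [List.length_cons]
    exact Nat.lt_succ_of_le (List.length_dropWhile_le _ _)

def count_alt (l : List String) : Int := countRuns l

-- ===== PRECONDITION & SPEC =====
def Spec_count (l : List String) (out : Int) : Prop := out = count_alt l
instance (l : List String) (out : Int) : Decidable (Spec_count l out) := by unfold Spec_count; infer_instance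

-- ===== CLAIM (what is proved, stated in full; the proofs are below) =====
def Claim_equal_count : Prop := ∀ (l : List String), Dom_count l → Spec_count l (count l)

-- ===== LEMMAS AND PROOFS =====

-- length of the leading run of "O"s
def lro (l : List String) : Nat := (l.takeWhile (· == "O")).length

theorem tri_succ (m : Nat) :
    PySem.Int.floordiv (((m : Int) + 1) * ((m : Int) + 2)) 2
      = PySem.Int.floordiv ((m : Int) * ((m : Int) + 1)) 2 + ((m : Int) + 1) := by
  have h : ((m : Int) + 1) * ((m : Int) + 2) = (m : Int) * ((m : Int) + 1) + ((m : Int) + 1) * 2 := by ring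
  rw [PySem.Int.floordiv_eq_ediv_of_pos, PySem.Int.floordiv_eq_ediv_of_pos, h,
      Int.add_mul_ediv_right _ _ (by norm_num : (2:Int) ≠ 0)]
  all_goals omega

theorem countRuns_nil : countRuns [] = 0 := by simp [countRuns]

theorem countRuns_cons (x : String) (xs : List String) :
    countRuns (x :: xs) =
      (if x == "O" then
          PySem.Int.floordiv ((((xs.takeWhile (· == x)).length : Int) + 1)
            * (((xs.takeWhile (· == x)).length : Int) + 1 + 1)) 2
        else 0) + countRuns (xs.dropWhile (· == x)) := by
  rw [countRuns]

theorem countRuns_cons_ne (x : String) (xs : List String) (hx : (x == "O") = false) :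
    countRuns (x :: xs) = countRuns xs := by
  rw [countRuns_cons, hx]
  simp only [Bool.false_eq_true, if_false, zero_add]
  cases xs with
  | nil => rfl
  | cons y ys =>
    by_cases hyx : (y == x) = true
    · have hpos : (x == "O") = false := hx
      have hyO : (y == "O") = false := by
        rw [show y = x from beq_iff_eq.mp hyx]; exact hx
      rw [countRuns_cons, hyO]
      simp only [if_false, Int.zero_add, zero_add, List.dropWhile_cons, hyx, if_true]
      have : x = y := (beq_iff_eq.mp hyx).symm
      subst this
      simp
    · simp [List.dropWhile_cons, hyx]

theorem countRuns_cons_O (xs : List String) :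
    countRuns ("O" :: xs) = 1 + countRuns xs + (lro xs : Int) := by
  rw [countRuns_cons]
  simp only [if_true, beq_self_eq_true]
  cases xs with
  | nil => simp [lro, countRuns_nil, PySem.Int.floordiv]
  | cons y ys =>
    by_cases hy : (y == "O") = true
    · have hyO : y = "O" := beq_iff_eq.mp hy
      subst hyO
      rw [countRuns_cons]
      simp only [beq_self_eq_true, if_true, List.takeWhile_cons, List.dropWhile_cons]
      simp only [hy, if_true] at *
      have hl : lro ("O" :: ys) = (ys.takeWhile (· == "O")).length + 1 := by
        simp [lro, List.takeWhile_cons]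
      rw [hl]
      have htri := tri_succ ((ys.takeWhile (· == "O")).length + 1)
      push_cast at htri ⊢
      simp only [List.length_cons]
      push_cast
      ring_nf
      ring_nf at htri
      omega
    · have hy' : (y == "O") = false := by simpa using hy
      have h0 : lro (y :: ys) = 0 := by simp [lro, List.takeWhile_cons, hy']
      rw [h0]
      simp only [List.takeWhile_cons, List.dropWhile_cons, hy', Bool.false_eq_true, if_false]
      rw [countRuns_cons_ne y ys hy']
      have h1 : PySem.Int.floordiv ((((List.nil (α := String)).length : Int) + 1)
          * (((List.nil (α := String)).length : Int) + 1 + 1)) 2 = 1 := by decide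
      simp only [List.length_nil, Int.natCast_zero] at h1 ⊢
      omega

-- A's fold from an arbitrary state, characterised by B's value
theorem foldA_eq (l : List String) : ∀ (t total : Int),
    (l.foldl (fun (st : Int × Int) i =>
      let temp := if i == "O" then st.1 + 1 else 0
      (temp, st.2 + temp)) (t, total)).2
      = total + countRuns l + t * (lro l : Int) := by
  induction l with
  | nil => intro t total; simp [countRuns_nil, lro]
  | cons x xs ih =>
    intro t total
    by_cases hx : (x == "O") = true
    · have hxO : x = "O" := beq_iff_eq.mp hx
      subst hxO
      simp only [List.foldl_cons, hx, if_true]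
      rw [ih, countRuns_cons_O]
      have : lro ("O" :: xs) = lro xs + 1 := by
        simp [lro, List.takeWhile_cons]
      rw [this]
      push_cast
      ring
    · have hx' : (x == "O") = false := by simpa using hx
      simp only [List.foldl_cons, hx', if_false]
      rw [ih, countRuns_cons_ne x xs hx']
      have : lro (x :: xs) = 0 := by simp [lro, List.takeWhile_cons, hx']
      rw [this]
      simp

-- ===== VERDICT (by name: the statement is the Claim_ definition above) =====
theorem count_spec : Claim_equal_count := by
  intro l _
  unfold Spec_count count count_alt
  rw [foldA_eq l 0 0]
  ring
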